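-- pv_equiv track=rewrite | github.com/ervand7/Summary | Algorithms and data structures/Algorithms/Tasks/Leetcode/Easy/220. Cells with Odd Values in a Matrix.py | odd_ells
-- ===== SOURCE A (Python) =====
-- from typing import List
--
-- def odd_ells(m: int, n: int, indices: List[List[int]]) -> int:
--     row_counts = [0] * m
--     col_counts = [0] * n
--
--     # Apply increments
--     for ri, ci in indices:
--         row_counts[ri] += 1
--         col_counts[ci] += 1
--
--     # Count odd rows and odd columns
--     odd_rows = sum(1 for x in row_counts if x % 2 == 1)
--     odd_cols = sum(1 for x in col_counts if x % 2 == 1)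
--
--     # Compute odd cells using the formula
--     return odd_rows * (n - odd_cols) + (m - odd_rows) * odd_cols
-- ===== SOURCE B (Python) =====
-- def odd_ells(m, n, indices):
--     # Materialize the full m x n matrix, apply every increment, count odd cells.
--     grid = [[0] * n for _ in range(m)]
--     for ri, ci in indices:
--         for j in range(n):
--             grid[ri][j] += 1
--         for i in range(m):
--             grid[i][ci] += 1
--     return sum(1 for row in grid for v in row if v % 2 == 1)
-- ===== Notes on version B (the rewrite author's own statement) =====
-- stated objective: alternative
-- what changed: B materializes the full m x n matrix, applies each [ri, ci] increment to every cell of row ri and column ci, and counts odd cells by a nested scan, replacing A's O(m+n) parity-counter closed form with an explicit simulate-and-scan.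
import Mathlib
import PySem

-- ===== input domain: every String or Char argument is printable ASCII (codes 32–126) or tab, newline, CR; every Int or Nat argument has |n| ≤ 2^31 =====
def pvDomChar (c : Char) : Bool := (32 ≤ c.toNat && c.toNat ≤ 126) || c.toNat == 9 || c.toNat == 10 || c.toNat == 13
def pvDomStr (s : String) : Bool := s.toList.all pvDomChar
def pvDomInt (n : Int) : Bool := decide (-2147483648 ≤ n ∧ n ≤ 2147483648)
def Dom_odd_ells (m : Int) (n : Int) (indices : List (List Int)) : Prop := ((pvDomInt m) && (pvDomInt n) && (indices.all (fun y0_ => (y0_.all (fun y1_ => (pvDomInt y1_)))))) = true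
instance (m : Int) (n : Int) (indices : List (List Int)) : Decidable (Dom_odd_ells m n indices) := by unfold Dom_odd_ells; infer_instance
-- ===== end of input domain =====

-- B materializes the full m×n grid, applies every increment cell by cell and counts odd cells by
-- scanning, instead of A's closed-form parity bookkeeping over row/column counters (objective:
-- alternative, not faster).

-- ===== PORT A =====
-- body of A's 'for ri, ci in indices' loop over the pair (row_counts, col_counts)
def oddStepA (s : List Int × List Int) (p : List Int) : List Int × List Int :=
  let ri := PySem.List.pyGetD p 0 0
  let ci := PySem.List.pyGetD p 1 0
  (PySem.List.pySetD s.1 ri (PySem.List.pyGetD s.1 ri 0 + 1),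
   PySem.List.pySetD s.2 ci (PySem.List.pyGetD s.2 ci 0 + 1))

-- sum(1 for x in xs if x % 2 == 1)
def oddCount (xs : List Int) : Int :=
  xs.foldl (fun acc x => if PySem.Int.mod x 2 = 1 then acc + 1 else acc) 0

def odd_ells (m : Int) (n : Int) (indices : List (List Int)) : Int :=
  let s := indices.foldl oddStepA (List.replicate m.toNat 0, List.replicate n.toNat 0)
  let odd_rows := oddCount s.1
  let odd_cols := oddCount s.2
  odd_rows * (n - odd_cols) + (m - odd_rows) * odd_cols

-- ===== PORT B =====
-- body of B's 'for ri, ci in indices' loop: increment row ri, then column ci, of the grid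
def oddStepB (m : Int) (n : Int) (g : List (List Int)) (p : List Int) : List (List Int) :=
  let ri := PySem.List.pyGetD p 0 0
  let ci := PySem.List.pyGetD p 1 0
  let g1 := (PySem.List.pyRange 0 n 1).foldl
    (fun g j => PySem.List.pySetD g ri
      (PySem.List.pySetD (PySem.List.pyGetD g ri []) j
        (PySem.List.pyGetD (PySem.List.pyGetD g ri []) j 0 + 1))) g
  (PySem.List.pyRange 0 m 1).foldl
    (fun g i => PySem.List.pySetD g i
      (PySem.List.pySetD (PySem.List.pyGetD g i []) ci
        (PySem.List.pyGetD (PySem.List.pyGetD g i []) ci 0 + 1))) g1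

def odd_ells_alt (m : Int) (n : Int) (indices : List (List Int)) : Int :=
  let grid := indices.foldl (oddStepB m n)
    (List.replicate m.toNat (List.replicate n.toNat 0))
  grid.foldl (fun acc row =>
    row.foldl (fun acc v => if PySem.Int.mod v 2 = 1 then acc + 1 else acc) acc) 0

-- ===== PRECONDITION & SPEC =====
-- Pre_ excludes exactly the inputs on which A raises: a pair of length ≠ 2 (ValueError on
-- unpacking) or a row/column index outside Python's wraparound range (IndexError).
def Pre_odd_ells (m : Int) (n : Int) (indices : List (List Int)) : Prop :=
  ∀ p ∈ indices, p.length = 2 ∧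
    (-m ≤ PySem.List.pyGetD p 0 0 ∧ PySem.List.pyGetD p 0 0 < m) ∧
    (-n ≤ PySem.List.pyGetD p 1 0 ∧ PySem.List.pyGetD p 1 0 < n)
instance (m : Int) (n : Int) (indices : List (List Int)) : Decidable (Pre_odd_ells m n indices) := by
  unfold Pre_odd_ells; infer_instance

def pvWitness_odd_ells : Int × Int × List (List Int) := (2, 3, [[0, 1], [1, 1]])

def Spec_odd_ells (m : Int) (n : Int) (indices : List (List Int)) (out : Int) : Prop :=
  out = odd_ells_alt m n indices
instance (m : Int) (n : Int) (indices : List (List Int)) (out : Int) : Decidable (Spec_odd_ells m n indices out) := by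
  unfold Spec_odd_ells; infer_instance

-- ===== CLAIM (what is proved, stated in full; the proofs are below) =====
def Claim_equal_odd_ells : Prop := ∀ (m : Int) (n : Int) (indices : List (List Int)),
  Dom_odd_ells m n indices → Pre_odd_ells m n indices →
  Spec_odd_ells m n indices (odd_ells m n indices)

-- ===== LEMMAS AND PROOFS =====

-- Python's wraparound index, normalized to a Nat (matches PySem.List.pyIdx? on in-range indices)
def pvNorm (len : Nat) (i : Int) : Nat := if 0 ≤ i then i.toNat else len - (-i).toNat

-- the abstract coupling: B's grid is always rc ⊗ cc, cell (i,j) = rc[i] + cc[j]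
def pvMk (rc cc : List Int) : List (List Int) := rc.map (fun a => cc.map (fun b => a + b))

-- the parity predicate both final counts use
def pvOddQ (x : Int) : Bool := decide (x % 2 = 1)

lemma oddq_eq : (fun x : Int => decide (PySem.Int.mod x 2 = 1)) = pvOddQ := by
  funext x
  simp [pvOddQ, PySem.Int.mod_eq_emod_of_pos (by norm_num : (0:Int) < 2)]

lemma pvIdx_eq {len : Nat} {i : Int} (h1 : -(len : Int) ≤ i) (h2 : i < (len : Int)) :
    PySem.List.pyIdx? len i = some (pvNorm len i) := by
  unfold PySem.List.pyIdx? pvNorm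
  split_ifs with h <;> simp_all

lemma pvNorm_lt {len : Nat} {i : Int} (h1 : -(len : Int) ≤ i) (h2 : i < (len : Int)) :
    pvNorm len i < len := by
  unfold pvNorm; split_ifs with h <;> omega

lemma pySetD_eq' {α : Type} (xs : List α) (i : Int) (v : α)
    (h1 : -(xs.length : Int) ≤ i) (h2 : i < (xs.length : Int)) :
    PySem.List.pySetD xs i v = xs.set (pvNorm xs.length i) v := by
  simp [PySem.List.pySetD, PySem.List.pySet?, pvIdx_eq h1 h2]

lemma pyGetD_eq' {α : Type} (xs : List α) (i : Int) (d : α)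
    (h1 : -(xs.length : Int) ≤ i) (h2 : i < (xs.length : Int)) :
    PySem.List.pyGetD xs i d = xs.getD (pvNorm xs.length i) d := by
  simp [PySem.List.pyGetD, PySem.List.pyGet?, pvIdx_eq h1 h2, List.getD]

-- repeated read-modify-write at ONE wraparound position i commutes with the loop
lemma foldl_pySet_fixed {α β : Type} (F : β → α → α) (d : α) (i : Int) :
    ∀ (L : List β) (xs : List α), -(xs.length : Int) ≤ i → i < (xs.length : Int) →
      L.foldl (fun g j => PySem.List.pySetD g i (F j (PySem.List.pyGetD g i d))) xs
        = PySem.List.pySetD xs i (L.foldl (fun a j => F j a) (PySem.List.pyGetD xs i d)) := by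
  intro L
  induction L with
  | nil =>
    intro xs h1 h2
    have hk := pvNorm_lt h1 h2
    simp only [List.foldl_nil]
    rw [pySetD_eq' _ _ _ h1 h2, pyGetD_eq' _ _ _ h1 h2,
        List.getD_eq_getElem?_getD, List.getElem?_eq_getElem hk]
    simp [List.set_getElem_self hk]
  | cons j L ih =>
    intro xs h1 h2
    have hk := pvNorm_lt h1 h2
    simp only [List.foldl_cons]
    rw [pySetD_eq' _ _ _ h1 h2, pyGetD_eq' _ _ _ h1 h2]
    rw [ih _ (by simpa using h1) (by simpa using h2)]
    rw [pySetD_eq' _ _ _ (by simpa using h1) (by simpa using h2),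
        pyGetD_eq' _ _ _ (by simpa using h1) (by simpa using h2)]
    simp only [List.length_set]
    rw [List.set_set, List.getD_eq_getElem?_getD, List.getElem?_set_self (by omega)]
    simp only [Option.getD_some]
    rw [pySetD_eq' _ _ _ h1 h2, List.getD_eq_getElem?_getD]

-- an in-place sweep g[k] := f(g[k]) over k = 0..L-1 is a map on the first L entries
lemma foldl_range_sweep {α : Type} (f : α → α) (d : α) :
    ∀ (L : Nat) (xs : List α), L ≤ xs.length →
      (List.range L).foldl (fun g k => g.set k (f (g.getD k d))) xs
        = (xs.take L).map f ++ xs.drop L := by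
  intro L
  induction L with
  | zero => intro xs h; simp
  | succ L ih =>
    intro xs h
    rw [List.range_succ, List.foldl_append, ih xs (by omega)]
    have hL : L < xs.length := by omega
    have hlen : ((xs.take L).map f).length = L := by
      simp [List.length_take, Nat.min_eq_left (Nat.le_of_lt hL)]
    have hdrop : xs.drop L = xs[L] :: xs.drop (L + 1) := (List.drop_eq_getElem_cons hL)
    simp only [List.foldl_cons, List.foldl_nil]
    rw [hdrop]
    have hget : (((xs.take L).map f) ++ xs[L] :: xs.drop (L + 1)).getD L d = xs[L] := by
      rw [List.getD_eq_getElem?_getD, List.getElem?_append_right (by rw [hlen]), hlen]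
      simp [List.getElem?_eq_getElem hL]
    rw [hget, List.set_append_right _ _ (by rw [hlen]), hlen]
    simp only [Nat.sub_self, List.set_cons_zero]
    simp only [List.map_take]
    have hL' : L < (List.map f xs).length := by simpa using hL
    have htake : List.take (L + 1) (List.map f xs) = List.take L (List.map f xs) ++ [f xs[L]] := by
      rw [List.take_add_one, List.getElem?_eq_getElem hL', Option.toList_some, List.getElem_map]
    rw [htake, List.append_assoc, List.singleton_append]

-- the inner 'for j in range(len(row)): row[j] += 1' is map (+1)
lemma sweep_incr (row : List Int) :
    (List.range row.length).foldl (fun r k => r.set k (r.getD k 0 + 1)) row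
      = row.map (· + 1) := by
  have h := foldl_range_sweep (f := (· + 1)) (d := 0) row.length row le_rfl
  simpa using h

lemma length_oddStepA_fst (s : List Int × List Int) (p : List Int) :
    (oddStepA s p).1.length = s.1.length := by
  simp [oddStepA, PySem.List.length_pySetD]

lemma length_oddStepA_snd (s : List Int × List Int) (p : List Int) :
    (oddStepA s p).2.length = s.2.length := by
  simp [oddStepA, PySem.List.length_pySetD]

-- one loop iteration preserves the coupling g = rc ⊗ cc
lemma step_couple (m n : Int) (hm : 0 < m) (hn : 0 < n) (rc cc : List Int) (p : List Int)
    (hrc : rc.length = m.toNat) (hcc : cc.length = n.toNat)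
    (hp : (-m ≤ PySem.List.pyGetD p 0 0 ∧ PySem.List.pyGetD p 0 0 < m) ∧
          (-n ≤ PySem.List.pyGetD p 1 0 ∧ PySem.List.pyGetD p 1 0 < n)) :
    oddStepB m n (pvMk rc cc) p = pvMk (oddStepA (rc, cc) p).1 (oddStepA (rc, cc) p).2 := by
  obtain ⟨⟨hri1, hri2⟩, hci1, hci2⟩ := hp
  set ri := PySem.List.pyGetD p 0 0 with hridef
  set ci := PySem.List.pyGetD p 1 0 with hcidef
  have hrcl : (rc.length : Int) = m := by rw [hrc]; exact Int.toNat_of_nonneg (by omega)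
  have hccl : (cc.length : Int) = n := by rw [hcc]; exact Int.toNat_of_nonneg (by omega)
  set kr := pvNorm rc.length ri with hkrdef
  set kc := pvNorm cc.length ci with hkcdef
  have hbr1 : -(rc.length : Int) ≤ ri := by omega
  have hbr2 : ri < (rc.length : Int) := by omega
  have hbc1 : -(cc.length : Int) ≤ ci := by omega
  have hbc2 : ci < (cc.length : Int) := by omega
  have hkr : kr < rc.length := pvNorm_lt hbr1 hbr2
  have hkc : kc < cc.length := pvNorm_lt hbc1 hbc2
  have hA1 : PySem.List.pySetD rc ri (PySem.List.pyGetD rc ri 0 + 1) = rc.set kr (rc[kr] + 1) := by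
    rw [pySetD_eq' _ _ _ hbr1 hbr2, pyGetD_eq' _ _ _ hbr1 hbr2,
        List.getD_eq_getElem?_getD, List.getElem?_eq_getElem hkr]
    rfl
  have hA2 : PySem.List.pySetD cc ci (PySem.List.pyGetD cc ci 0 + 1) = cc.set kc (cc[kc] + 1) := by
    rw [pySetD_eq' _ _ _ hbc1 hbc2, pyGetD_eq' _ _ _ hbc1 hbc2,
        List.getD_eq_getElem?_getD, List.getElem?_eq_getElem hkc]
    rfl
  have hGlen : (pvMk rc cc).length = rc.length := by simp [pvMk]
  have hGb1 : -((pvMk rc cc).length : Int) ≤ ri := by rw [hGlen]; exact hbr1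
  have hGb2 : ri < ((pvMk rc cc).length : Int) := by rw [hGlen]; exact hbr2
  have hGnorm : pvNorm (pvMk rc cc).length ri = kr := by rw [hGlen]
  have hrow : PySem.List.pyGetD (pvMk rc cc) ri [] = cc.map (fun b => rc[kr] + b) := by
    rw [pyGetD_eq' _ _ _ hGb1 hGb2, hGnorm, List.getD_eq_getElem?_getD,
        List.getElem?_eq_getElem (by rw [hGlen]; exact hkr)]
    simp [pvMk]
  have hinner :
      (PySem.List.pyRange 0 n 1).foldl
          (fun r j => PySem.List.pySetD r j (PySem.List.pyGetD r j 0 + 1))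
          (cc.map (fun b => rc[kr] + b))
        = cc.map (fun b => (rc[kr] + 1) + b) := by
    rw [PySem.List.pyRange_one, List.foldl_map]
    simp only [zero_add, PySem.List.pySetD_natCast, PySem.List.pyGetD_natCast, sub_zero]
    have hlen : n.toNat = (cc.map (fun b => rc[kr] + b)).length := by simp [hcc]
    rw [hlen, sweep_incr, List.map_map]
    have hfun : ((· + 1) ∘ fun b => rc[kr] + b) = (fun b : Int => (rc[kr] + 1) + b) := by
      funext b
      simp [Function.comp]
      ring
    rw [hfun]
  have hg1 :
      (PySem.List.pyRange 0 n 1).foldl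
          (fun g j => PySem.List.pySetD g ri
            (PySem.List.pySetD (PySem.List.pyGetD g ri []) j
              (PySem.List.pyGetD (PySem.List.pyGetD g ri []) j 0 + 1))) (pvMk rc cc)
        = pvMk (rc.set kr (rc[kr] + 1)) cc := by
    rw [foldl_pySet_fixed (fun j r => PySem.List.pySetD r j (PySem.List.pyGetD r j 0 + 1)) []
          ri _ _ hGb1 hGb2]
    rw [hrow, hinner, pySetD_eq' _ _ _ hGb1 hGb2, hGnorm]
    simp [pvMk, List.map_set]
  have hcolfun : ∀ a : Int,
      PySem.List.pySetD (cc.map (fun b => a + b)) ci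
          (PySem.List.pyGetD (cc.map (fun b => a + b)) ci 0 + 1)
        = (cc.set kc (cc[kc] + 1)).map (fun b => a + b) := by
    intro a
    have hb1 : -((cc.map (fun b => a + b)).length : Int) ≤ ci := by rw [List.length_map]; exact hbc1
    have hb2 : ci < ((cc.map (fun b => a + b)).length : Int) := by rw [List.length_map]; exact hbc2
    have hnorm : pvNorm (cc.map (fun b => a + b)).length ci = kc := by rw [List.length_map]
    rw [pySetD_eq' _ _ _ hb1 hb2, pyGetD_eq' _ _ _ hb1 hb2, hnorm,
        List.getD_eq_getElem?_getD, List.getElem?_eq_getElem (by rw [List.length_map]; exact hkc),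
        List.getElem_map, List.map_set]
    simp only [Option.getD_some]
    congr 1
    ring
  have hg2 :
      (PySem.List.pyRange 0 m 1).foldl
          (fun g i => PySem.List.pySetD g i
            (PySem.List.pySetD (PySem.List.pyGetD g i []) ci
              (PySem.List.pyGetD (PySem.List.pyGetD g i []) ci 0 + 1)))
          (pvMk (rc.set kr (rc[kr] + 1)) cc)
        = pvMk (rc.set kr (rc[kr] + 1)) (cc.set kc (cc[kc] + 1)) := by
    rw [PySem.List.pyRange_one, List.foldl_map]
    simp only [zero_add, PySem.List.pySetD_natCast, PySem.List.pyGetD_natCast, sub_zero]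
    have hlen2 : m.toNat = (pvMk (rc.set kr (rc[kr] + 1)) cc).length := by
      simp [pvMk, hrc]
    rw [hlen2, foldl_range_sweep
        (fun row => PySem.List.pySetD row ci (PySem.List.pyGetD row ci 0 + 1)) [] _ _ le_rfl]
    simp only [List.take_length, List.drop_length, List.append_nil]
    simp only [pvMk, List.map_map]
    have : ((fun row => PySem.List.pySetD row ci (PySem.List.pyGetD row ci 0 + 1)) ∘
            fun a => cc.map (fun b => a + b))
          = fun a => (cc.set kc (cc[kc] + 1)).map (fun b => a + b) := by
      funext a
      exact hcolfun a
    rw [this]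
  simp only [oddStepB, oddStepA, ← hridef, ← hcidef]
  rw [hg1, hg2, hA1, hA2]

-- the whole loop preserves the coupling
lemma fold_couple (m n : Int) :
    ∀ (idx : List (List Int)) (rc cc : List Int),
      rc.length = m.toNat → cc.length = n.toNat →
      (∀ p ∈ idx, (-m ≤ PySem.List.pyGetD p 0 0 ∧ PySem.List.pyGetD p 0 0 < m) ∧
                  (-n ≤ PySem.List.pyGetD p 1 0 ∧ PySem.List.pyGetD p 1 0 < n)) →
      idx.foldl (oddStepB m n) (pvMk rc cc)
        = pvMk (idx.foldl oddStepA (rc, cc)).1 (idx.foldl oddStepA (rc, cc)).2 := by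
  intro idx
  induction idx with
  | nil => intro rc cc _ _ _; simp
  | cons p idx ih =>
    intro rc cc hrc hcc hpre
    have hp := hpre p (by simp)
    have hm : 0 < m := by omega
    have hn : 0 < n := by omega
    simp only [List.foldl_cons]
    rw [step_couple m n hm hn rc cc p hrc hcc hp]
    have h1 : (oddStepA (rc, cc) p).1.length = m.toNat := by rw [length_oddStepA_fst]; exact hrc
    have h2 : (oddStepA (rc, cc) p).2.length = n.toNat := by rw [length_oddStepA_snd]; exact hcc
    rw [ih _ _ h1 h2 (fun q hq => hpre q (by simp [hq]))]

lemma fold_lengths (idx : List (List Int)) (rc cc : List Int) :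
    (idx.foldl oddStepA (rc, cc)).1.length = rc.length ∧
    (idx.foldl oddStepA (rc, cc)).2.length = cc.length := by
  induction idx generalizing rc cc with
  | nil => simp
  | cons p idx ih =>
    simp only [List.foldl_cons]
    rcases hs : oddStepA (rc, cc) p with ⟨a, b⟩
    have ha : a.length = rc.length := by
      have := length_oddStepA_fst (rc, cc) p; rw [hs] at this; simpa using this
    have hb : b.length = cc.length := by
      have := length_oddStepA_snd (rc, cc) p; rw [hs] at this; simpa using this
    rw [← ha, ← hb]; exact ih a b

lemma oddCount_eq_countP (xs : List Int) : oddCount xs = (xs.countP pvOddQ : Int) := by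
  unfold oddCount
  rw [PySem.List.foldl_ite_add_one, oddq_eq]
  omega

lemma parity_add (a b : Int) :
    ((a + b) % 2 = 1) ↔ ((a % 2 = 1) ↔ ¬(b % 2 = 1)) := by
  omega

lemma row_count (a : Int) (cc : List Int) :
    ((cc.map (fun b => a + b)).countP pvOddQ : Int)
      = if a % 2 = 1 then (cc.length : Int) - cc.countP pvOddQ
        else (cc.countP pvOddQ : Int) := by
  induction cc with
  | nil => simp
  | cons b cc ih =>
    have hle : cc.countP pvOddQ ≤ cc.length := List.countP_le_length
    have hab := parity_add a b
    simp only [List.map_cons, List.countP_cons, List.length_cons]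
    by_cases ha : a % 2 = 1 <;> by_cases hb : b % 2 = 1
    · have h1 : pvOddQ (a + b) = false := by
        simp only [pvOddQ, decide_eq_false_iff_not]; intro h; have := hab.mp h; tauto
      have h2 : pvOddQ b = true := by simp only [pvOddQ, decide_eq_true_eq]; exact hb
      rw [if_pos ha] at ih ⊢
      simp only [h1, h2, if_true, if_false]
      push_cast
      omega
    · have h1 : pvOddQ (a + b) = true := by
        simp only [pvOddQ, decide_eq_true_eq]; exact hab.mpr (by tauto)
      have h2 : pvOddQ b = false := by simp only [pvOddQ, decide_eq_false_iff_not]; exact hb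
      rw [if_pos ha] at ih ⊢
      simp only [h1, h2, if_true, if_false]
      push_cast
      omega
    · have h1 : pvOddQ (a + b) = true := by
        simp only [pvOddQ, decide_eq_true_eq]; exact hab.mpr (by tauto)
      have h2 : pvOddQ b = true := by simp only [pvOddQ, decide_eq_true_eq]; exact hb
      rw [if_neg ha] at ih ⊢
      simp only [h1, h2, if_true]
      push_cast
      omega
    · have h1 : pvOddQ (a + b) = false := by
        simp only [pvOddQ, decide_eq_false_iff_not]; intro h; have := hab.mp h; tauto
      have h2 : pvOddQ b = false := by simp only [pvOddQ, decide_eq_false_iff_not]; exact hb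
      rw [if_neg ha] at ih ⊢
      simp only [h1, h2, if_false]
      push_cast
      omega

lemma count_mk (cc : List Int) :
    ∀ rc : List Int,
      (((pvMk rc cc).flatten.countP pvOddQ : Int))
        = (rc.countP pvOddQ : Int) * ((cc.length : Int) - cc.countP pvOddQ)
          + ((rc.length : Int) - rc.countP pvOddQ) * (cc.countP pvOddQ : Int) := by
  intro rc
  induction rc with
  | nil => simp [pvMk]
  | cons a rc ih =>
    simp only [pvMk] at ih ⊢
    simp only [List.map_cons, List.flatten_cons, List.countP_append, List.countP_cons,
      List.length_cons]
    by_cases ha : a % 2 = 1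
    · have h3 : pvOddQ a = true := by simp only [pvOddQ, decide_eq_true_eq]; exact ha
      simp only [h3, if_true]
      push_cast
      rw [ih, row_count a cc, if_pos ha]
      ring
    · have h3 : pvOddQ a = false := by simp only [pvOddQ, decide_eq_false_iff_not]; exact ha
      simp only [h3, if_false]
      push_cast
      rw [ih, row_count a cc, if_neg ha]
      ring

lemma countP_replicate_zero (k : Nat) : (List.replicate k (0 : Int)).countP pvOddQ = 0 := by
  rw [List.countP_eq_zero]
  intro x hx
  rw [List.eq_of_mem_replicate hx]
  simp [pvOddQ]

lemma mk_init (M N : Nat) :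
    pvMk (List.replicate M 0) (List.replicate N 0) = List.replicate M (List.replicate N 0) := by
  simp [pvMk, List.map_replicate]

lemma alt_eq_count (m n : Int) (indices : List (List Int)) (grid : List (List Int))
    (hg : indices.foldl (oddStepB m n) (List.replicate m.toNat (List.replicate n.toNat 0)) = grid) :
    odd_ells_alt m n indices = (grid.flatten.countP pvOddQ : Int) := by
  unfold odd_ells_alt
  rw [hg, ← List.foldl_flatten, PySem.List.foldl_ite_add_one, oddq_eq]
  omega

-- ===== VERDICT (by name: the statement is the Claim_ definition above) =====
theorem odd_ells_spec : Claim_equal_odd_ells := by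
  intro m n indices _ hpre
  unfold Spec_odd_ells
  have hrc0l : (List.replicate m.toNat (0:Int)).length = m.toNat := by simp
  have hcc0l : (List.replicate n.toNat (0:Int)).length = n.toNat := by simp
  have hcouple := fold_couple m n indices (List.replicate m.toNat 0) (List.replicate n.toNat 0)
    hrc0l hcc0l (fun p hp => (hpre p hp).2)
  have hlens := fold_lengths indices (List.replicate m.toNat 0) (List.replicate n.toNat 0)
  rcases hF : indices.foldl oddStepA (List.replicate m.toNat 0, List.replicate n.toNat 0)
    with ⟨rcF, ccF⟩
  rw [hF] at hcouple hlens
  simp only at hlens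
  have hA : odd_ells m n indices
      = oddCount rcF * (n - oddCount ccF) + (m - oddCount rcF) * oddCount ccF := by
    simp only [odd_ells]
    rw [hF]

  have hB : odd_ells_alt m n indices = ((pvMk rcF ccF).flatten.countP pvOddQ : Int) := by
    apply alt_eq_count
    rw [← mk_init, hcouple]
  rw [hA, hB, count_mk, oddCount_eq_countP, oddCount_eq_countP]
  rw [hlens.1, hlens.2, hrc0l, hcc0l]
  rcases indices with _ | ⟨p, idx⟩
  · -- empty indices: every counter is zero on both sides
    simp only [List.foldl_nil, Prod.mk.injEq] at hF
    rw [← hF.1, ← hF.2]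
    simp only [countP_replicate_zero]
    push_cast
    ring
  · have hp := hpre p (by simp)
    have hm : 0 < m := by
      have := hp.2.1
      omega
    have hn : 0 < n := by
      have := hp.2.2
      omega
    rw [Int.toNat_of_nonneg (by omega : (0:Int) ≤ m), Int.toNat_of_nonneg (by omega : (0:Int) ≤ n)]
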